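-- pv_equiv track=rewrite | github.com/lonejavid/Translation_Services | server/services/voice_extractor.py | _all_speech_runs
-- ===== SOURCE A (Python) =====
-- def _all_speech_runs(
--     flags: list[bool],
--     samples_per_frame: int,
--     max_gap_frames: int = 10,
--     min_run_frames: int = 10,
-- ) -> list[tuple[int, int]]:
--     """
--     Find ALL contiguous speech runs (not just the first).
--     Returns list of (start_sample, end_sample_exclusive) in 16 kHz indices,
--     sorted by duration descending.
--     """
--     runs: list[tuple[int, int]] = []
--     n = len(flags)
--     i = 0
--     while i < n:
--         # Skip silence
--         while i < n and not flags[i]: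
--             i += 1
--         if i >= n:
--             break
--         start_f = i
--         last_speech = i
--         gap = 0
--         i += 1
--         while i < n:
--             if flags[i]:
--                 last_speech = i
--                 gap = 0
--             else:
--                 gap += 1
--                 if gap > max_gap_frames:
--                     break
--             i += 1
--         run_frames = last_speech - start_f + 1
--         if run_frames >= min_run_frames:
--             runs.append((start_f * samples_per_frame, (last_speech + 1) * samples_per_frame))
--     return runs
-- ===== SOURCE B (Python) =====
-- def _raw_runs(flags):
--     # maximal runs of consecutive True frames, as (start, end_inclusive)
--     runs = []
--     i, n = 0, len(flags)
--     while i < n: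
--         if not flags[i]:
--             i += 1
--         else:
--             s = i
--             i += 1
--             while i < n and flags[i]:
--                 i += 1
--             runs.append((s, i - 1))
--     return runs
--
--
-- def _all_speech_runs(
--     flags: list[bool],
--     samples_per_frame: int,
--     max_gap_frames: int = 10,
--     min_run_frames: int = 10,
-- ) -> list[tuple[int, int]]:
--     out = []
--     pend = None
--     for s, e in _raw_runs(flags):
--         if pend is None:
--             pend = (s, e)
--         elif s - pend[1] - 1 <= max_gap_frames:
--             pend = (pend[0], e)
--         else:
--             if pend[1] - pend[0] + 1 >= min_run_frames:
--                 out.append((pend[0] * samples_per_frame, (pend[1] + 1) * samples_per_frame))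
--             pend = (s, e)
--     if pend is not None:
--         if pend[1] - pend[0] + 1 >= min_run_frames:
--             out.append((pend[0] * samples_per_frame, (pend[1] + 1) * samples_per_frame))
--     return out
-- ===== Notes on version B (the rewrite author's own statement) =====
-- stated objective: simpler
-- what changed: A's single interleaved scan with start_f/last_speech/gap bookkeeping is replaced by two clean passes: first collect the maximal runs of consecutive True frames as (start, end) pairs, then merge adjacent runs whose silence gap is <= max_gap_frames and emit the ones with at least min_run_frames frames.
import Mathlib
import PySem

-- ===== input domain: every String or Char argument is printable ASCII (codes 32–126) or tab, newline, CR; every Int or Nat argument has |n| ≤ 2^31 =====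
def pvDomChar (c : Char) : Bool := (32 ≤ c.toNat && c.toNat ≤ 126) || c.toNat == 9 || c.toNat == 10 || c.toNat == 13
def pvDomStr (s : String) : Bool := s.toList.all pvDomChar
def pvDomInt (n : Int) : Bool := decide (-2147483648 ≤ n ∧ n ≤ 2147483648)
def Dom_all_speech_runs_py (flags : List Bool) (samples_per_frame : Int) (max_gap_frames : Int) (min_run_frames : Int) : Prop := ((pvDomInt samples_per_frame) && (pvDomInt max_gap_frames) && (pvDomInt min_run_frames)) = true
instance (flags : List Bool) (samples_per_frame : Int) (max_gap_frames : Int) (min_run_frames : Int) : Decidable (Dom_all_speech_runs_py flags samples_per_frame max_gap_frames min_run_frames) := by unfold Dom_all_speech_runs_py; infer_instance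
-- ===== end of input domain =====

-- B replaces A's single interleaved scan by two passes (collect maximal True runs, then merge runs across small gaps and filter);
-- objective: simpler decomposition, same cost. Return values proved equal on all inputs.

-- ===== PORT A =====
-- 'if run_frames >= min_run_frames: runs.append(...)' at the end of each outer iteration
def pvCloseA (spf minr s l : Int) : List (Int × Int) :=
  if l - s + 1 ≥ minr then [(s * spf, (l + 1) * spf)] else []

mutual
-- outer while loop of A, fused with its silence-skipping inner while; i is the index of the head of the remaining list
def pvOuterA (spf gapmax minr : Int) : List Bool → Int → List (Int × Int)
  | [], _ => []
  | false :: t, i => pvOuterA spf gapmax minr t (i + 1)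
  | true :: t, i => pvInnerA spf gapmax minr t (i + 1) i i 0
termination_by l _ => (l.length, 0)
-- A's inner 'while i < n' loop; arguments: remaining list, i, start_f, last_speech, gap
def pvInnerA (spf gapmax minr : Int) : List Bool → Int → Int → Int → Int → List (Int × Int)
  | [], _, s, l, _ => pvCloseA spf minr s l
  | true :: t, i, s, _, _ => pvInnerA spf gapmax minr t (i + 1) s i 0
  | false :: t, i, s, l, g =>
      if g + 1 > gapmax then
        pvCloseA spf minr s l ++ pvOuterA spf gapmax minr (false :: t) i
      else pvInnerA spf gapmax minr t (i + 1) s l (g + 1)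
termination_by l _ _ _ _ => (l.length, 1)
end

def all_speech_runs_py (flags : List Bool) (samples_per_frame : Int) (max_gap_frames : Int) (min_run_frames : Int) : List (Int × Int) :=
  pvOuterA samples_per_frame max_gap_frames min_run_frames flags 0

-- ===== PORT B =====
mutual
-- B pass 1 (_raw_runs): outer while loop; i is the index of the head of the remaining list
def pvRawB : List Bool → Int → List (Int × Int)
  | [], _ => []
  | false :: t, i => pvRawB t (i + 1)
  | true :: t, i => pvGrowB t i i
termination_by l _ => (l.length, 0)
-- B's inner 'while i < n and flags[i]' loop; c = i - 1 is the last True index so far, s the run start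
def pvGrowB : List Bool → Int → Int → List (Int × Int)
  | [], s, c => [(s, c)]
  | true :: t, s, c => pvGrowB t s (c + 1)
  | false :: t, s, c => (s, c) :: pvRawB (false :: t) (c + 1)
termination_by l _ _ => (l.length, 1)
end

def pvCloseB (spf minr s e : Int) : List (Int × Int) :=
  if e - s + 1 ≥ minr then [(s * spf, (e + 1) * spf)] else []

-- B pass 2: the for-loop over raw runs with pending accumulated run 'pend'
def pvMergeB (spf gapmax minr : Int) : List (Int × Int) → Option (Int × Int) → List (Int × Int)
  | [], none => []
  | [], some (ps, pe) => pvCloseB spf minr ps pe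
  | (s, e) :: t, none => pvMergeB spf gapmax minr t (some (s, e))
  | (s, e) :: t, some (ps, pe) =>
      if s - pe - 1 ≤ gapmax then pvMergeB spf gapmax minr t (some (ps, e))
      else pvCloseB spf minr ps pe ++ pvMergeB spf gapmax minr t (some (s, e))

def all_speech_runs_py_alt (flags : List Bool) (samples_per_frame : Int) (max_gap_frames : Int) (min_run_frames : Int) : List (Int × Int) :=
  pvMergeB samples_per_frame max_gap_frames min_run_frames (pvRawB flags 0) none

-- ===== PRECONDITION & SPEC =====
def Spec_all_speech_runs_py (flags : List Bool) (samples_per_frame : Int) (max_gap_frames : Int) (min_run_frames : Int) (out : List (Int × Int)) : Prop := out = all_speech_runs_py_alt flags samples_per_frame max_gap_frames min_run_frames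
instance (flags : List Bool) (samples_per_frame : Int) (max_gap_frames : Int) (min_run_frames : Int) (out : List (Int × Int)) : Decidable (Spec_all_speech_runs_py flags samples_per_frame max_gap_frames min_run_frames out) := by unfold Spec_all_speech_runs_py; infer_instance

-- ===== CLAIM (what is proved, stated in full; the proofs are below) =====
def Claim_equal_all_speech_runs_py : Prop := ∀ (flags : List Bool) (samples_per_frame : Int) (max_gap_frames : Int) (min_run_frames : Int), Dom_all_speech_runs_py flags samples_per_frame max_gap_frames min_run_frames → Spec_all_speech_runs_py flags samples_per_frame max_gap_frames min_run_frames (all_speech_runs_py flags samples_per_frame max_gap_frames min_run_frames)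

-- ===== LEMMAS AND PROOFS =====

-- proof-side abstraction: B's state while inside a True run whose merged pending run is (S, c)
def pvMin (spf gapmax minr : Int) : List Bool → Int → Int → List (Int × Int)
  | [], c, S => pvCloseB spf minr S c
  | true :: t, c, S => pvMin spf gapmax minr t (c + 1) S
  | false :: t, c, S => pvMergeB spf gapmax minr (pvRawB (false :: t) (c + 1)) (some (S, c))

theorem pvGrowB_head (t : List Bool) (s c : Int) :
    ∃ e rest, pvGrowB t s c = (s, e) :: rest := by
  induction t generalizing c with
  | nil => exact ⟨c, [], by simp [pvGrowB]⟩
  | cons b t ih =>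
    cases b
    · exact ⟨c, pvRawB (false :: t) (c + 1), by simp [pvGrowB]⟩
    · obtain ⟨e, rest, hh⟩ := ih (c + 1)
      exact ⟨e, rest, by simp [pvGrowB, hh]⟩

theorem pvRawB_head (t : List Bool) (j s e : Int) (rest : List (Int × Int))
    (h : pvRawB t j = (s, e) :: rest) : j ≤ s := by
  induction t generalizing j with
  | nil => simp [pvRawB] at h
  | cons b t ih =>
    cases b
    · have := ih (j + 1) (by simpa [pvRawB] using h); omega
    · obtain ⟨e', rest', hh⟩ := pvGrowB_head t j j
      rw [show pvRawB (true :: t) j = pvGrowB t j j by simp [pvRawB], hh] at h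
      cases h; omega

theorem pvMergeB_split (spf gapmax minr : Int) (rl : List (Int × Int)) (ps pe : Int)
    (h : ∀ s e rest, rl = (s, e) :: rest → s - pe - 1 > gapmax) :
    pvMergeB spf gapmax minr rl (some (ps, pe)) =
      pvCloseB spf minr ps pe ++ pvMergeB spf gapmax minr rl none := by
  cases rl with
  | nil => simp [pvMergeB]
  | cons r t =>
    obtain ⟨s, e⟩ := r
    have := h s e t rfl
    simp [pvMergeB, show ¬ (s - pe - 1 ≤ gapmax) by omega]

theorem pvGM_some (spf gapmax minr : Int) (t : List Bool) (s c ps pe : Int)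
    (h : s - pe - 1 ≤ gapmax) :
    pvMergeB spf gapmax minr (pvGrowB t s c) (some (ps, pe)) = pvMin spf gapmax minr t c ps := by
  induction t generalizing c with
  | nil => simp [pvGrowB, pvMergeB, pvMin, h]
  | cons b t ih =>
    cases b
    · simp [pvGrowB, pvMergeB, pvMin, h]
    · simpa [pvGrowB, pvMin] using ih (c + 1)

theorem pvGM_none (spf gapmax minr : Int) (t : List Bool) (s c : Int) :
    pvMergeB spf gapmax minr (pvGrowB t s c) none = pvMin spf gapmax minr t c s := by
  induction t generalizing c with
  | nil => simp [pvGrowB, pvMergeB, pvMin]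
  | cons b t ih =>
    cases b
    · simp [pvGrowB, pvMergeB, pvMin]
    · simpa [pvGrowB, pvMin] using ih (c + 1)

theorem pvCloseAB (spf minr s l : Int) : pvCloseA spf minr s l = pvCloseB spf minr s l := rfl

theorem pvMainInd (spf gapmax minr : Int) (n : Nat) :
    ∀ l : List Bool, l.length ≤ n →
      ((∀ i : Int, pvOuterA spf gapmax minr l i = pvMergeB spf gapmax minr (pvRawB l i) none) ∧
       (∀ s last : Int, pvInnerA spf gapmax minr l (last + 1) s last 0 = pvMin spf gapmax minr l last s) ∧
       (∀ i s last g : Int, 1 ≤ g → g ≤ gapmax → i = last + g + 1 →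
          pvInnerA spf gapmax minr l i s last g =
            pvMergeB spf gapmax minr (pvRawB l i) (some (s, last)))) := by
  induction n with
  | zero =>
    intro l hl
    have : l = [] := List.length_eq_zero_iff.mp (Nat.le_zero.mp hl)
    subst this
    refine ⟨fun i => by simp [pvOuterA, pvRawB, pvMergeB],
      fun s last => by simp [pvInnerA, pvMin, pvCloseAB],
      fun i s last g _ _ _ => by simp [pvInnerA, pvRawB, pvMergeB, pvCloseAB]⟩
  | succ n ih =>
    intro l hl
    cases l with
    | nil =>
      refine ⟨fun i => by simp [pvOuterA, pvRawB, pvMergeB],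
        fun s last => by simp [pvInnerA, pvMin, pvCloseAB],
        fun i s last g _ _ _ => by simp [pvInnerA, pvRawB, pvMergeB, pvCloseAB]⟩
    | cons b t =>
      have ht : t.length ≤ n := by simpa using Nat.lt_succ_iff.mp (by simpa using hl)
      obtain ⟨ihP, ihQ0, ihQg⟩ := ih t ht
      refine ⟨?_, ?_, ?_⟩
      · -- outer loop
        intro i
        cases b
        · simpa [pvOuterA, pvRawB] using ihP (i + 1)
        · rw [show pvOuterA spf gapmax minr (true :: t) i
              = pvInnerA spf gapmax minr t (i + 1) i i 0 by simp [pvOuterA],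
            show pvRawB (true :: t) i = pvGrowB t i i by simp [pvRawB],
            pvGM_none]
          simpa using ihQ0 i i
      · -- inner loop just after a speech frame (gap = 0)
        intro s last
        cases b
        · rw [show pvInnerA spf gapmax minr (false :: t) (last + 1) s last 0
              = (if 0 + 1 > gapmax then
                  pvCloseA spf minr s last ++ pvOuterA spf gapmax minr (false :: t) (last + 1)
                 else pvInnerA spf gapmax minr t (last + 1 + 1) s last (0 + 1)) by simp [pvInnerA],
            show pvMin spf gapmax minr (false :: t) last s
              = pvMergeB spf gapmax minr (pvRawB (false :: t) (last + 1)) (some (s, last)) by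
                simp [pvMin],
            show pvRawB (false :: t) (last + 1) = pvRawB t (last + 1 + 1) by simp [pvRawB]]
          by_cases hmax : (0 : Int) + 1 > gapmax
          · rw [if_pos hmax]
            have hsplit : ∀ s' e' rest, pvRawB t (last + 1 + 1) = (s', e') :: rest →
                s' - last - 1 > gapmax := by
              intro s' e' rest hr
              have := pvRawB_head t (last + 1 + 1) s' e' rest hr
              omega
            rw [pvMergeB_split spf gapmax minr _ s last hsplit, pvCloseAB,
              show pvOuterA spf gapmax minr (false :: t) (last + 1)
                = pvOuterA spf gapmax minr t (last + 1 + 1) by simp [pvOuterA],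
              ihP (last + 1 + 1)]
          · rw [if_neg hmax]
            exact ihQg (last + 1 + 1) s last 1 (by omega) (by omega) (by omega)
        · rw [show pvInnerA spf gapmax minr (true :: t) (last + 1) s last 0
              = pvInnerA spf gapmax minr t (last + 1 + 1) s (last + 1) 0 by simp [pvInnerA],
            show pvMin spf gapmax minr (true :: t) last s
              = pvMin spf gapmax minr t (last + 1) s by simp [pvMin]]
          exact ihQ0 s (last + 1)
      · -- inner loop inside a silence gap (1 ≤ gap ≤ max_gap_frames)
        intro i s last g hg1 hgm hi
        cases b
        · rw [show pvInnerA spf gapmax minr (false :: t) i s last g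
              = (if g + 1 > gapmax then
                  pvCloseA spf minr s last ++ pvOuterA spf gapmax minr (false :: t) i
                 else pvInnerA spf gapmax minr t (i + 1) s last (g + 1)) by simp [pvInnerA],
            show pvRawB (false :: t) i = pvRawB t (i + 1) by simp [pvRawB]]
          by_cases hmax : g + 1 > gapmax
          · rw [if_pos hmax]
            have hsplit : ∀ s' e' rest, pvRawB t (i + 1) = (s', e') :: rest →
                s' - last - 1 > gapmax := by
              intro s' e' rest hr
              have := pvRawB_head t (i + 1) s' e' rest hr
              omega
            rw [pvMergeB_split spf gapmax minr _ s last hsplit, pvCloseAB,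
              show pvOuterA spf gapmax minr (false :: t) i
                = pvOuterA spf gapmax minr t (i + 1) by simp [pvOuterA],
              ihP (i + 1)]
          · rw [if_neg hmax]
            exact ihQg (i + 1) s last (g + 1) (by omega) (by omega) (by omega)
        · rw [show pvInnerA spf gapmax minr (true :: t) i s last g
              = pvInnerA spf gapmax minr t (i + 1) s i 0 by simp [pvInnerA],
            show pvRawB (true :: t) i = pvGrowB t i i by simp [pvRawB],
            pvGM_some spf gapmax minr t i i s last (by omega)]
          exact ihQ0 s i

-- ===== VERDICT (by name: the statement is the Claim_ definition above) =====
theorem all_speech_runs_py_spec : Claim_equal_all_speech_runs_py := by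
  intro flags spf gapmax minr _
  unfold Spec_all_speech_runs_py all_speech_runs_py all_speech_runs_py_alt
  exact ((pvMainInd spf gapmax minr flags.length flags le_rfl).1 0)
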